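-- pv_equiv track=rewrite | github.com/KimDaeUng/py_algo | 개인문제/Codility/Lesson03-Time-Complexity/TapeEguilibrium.py | solution
-- ===== SOURCE A (Python) =====
-- def solution(A):
--     N = len(A)
--     P = 1
--     answer = int(1e9*2)
--     while P < N:
--         diff = abs(sum(A[:P]) - sum(A[P:]))
--         P += 1
--         answer = min(answer, diff)
--     return answer
-- ===== SOURCE B (Python) =====
-- def solution(A):
--     total = sum(A)
--     left = 0
--     answer = 2 * 10**9
--     for x in A[:-1]:
--         left += x
--         answer = min(answer, abs(2 * left - total))
--     return answer
-- ===== Notes on version B (the rewrite author's own statement) =====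
-- stated objective: faster
-- what changed: Replaces the per-split re-summation of both slices (sum(A[:P]) and sum(A[P:]) recomputed for every P) with one total sum and an incrementally updated left prefix sum, comparing |2*left - total| in a single pass.
import Mathlib
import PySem

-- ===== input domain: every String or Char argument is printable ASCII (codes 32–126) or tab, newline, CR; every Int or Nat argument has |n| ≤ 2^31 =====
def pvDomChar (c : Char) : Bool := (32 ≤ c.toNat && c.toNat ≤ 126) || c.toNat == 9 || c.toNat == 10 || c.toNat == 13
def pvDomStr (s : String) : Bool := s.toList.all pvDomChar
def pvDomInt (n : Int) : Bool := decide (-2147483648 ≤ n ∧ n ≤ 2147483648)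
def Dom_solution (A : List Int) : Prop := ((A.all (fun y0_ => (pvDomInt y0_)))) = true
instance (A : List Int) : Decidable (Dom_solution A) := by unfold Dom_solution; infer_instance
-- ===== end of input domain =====

-- B replaces A's per-split re-summation of both slices with one total sum and a running left prefix
-- sum (one pass, |2*left - total|); objective: faster.

-- ===== PORT A =====
-- while P < N: diff = abs(sum(A[:P]) - sum(A[P:])); P += 1; answer = min(answer, diff)
def solLoopA (A : List Int) (N P : Nat) (answer : Int) : Int :=
  if P < N then
    solLoopA A N (P + 1)
      (min answer |(PySem.List.slice A none (some (P : Int))).sum -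
                   (PySem.List.slice A (some (P : Int)) none).sum|)
  else answer
termination_by N - P

def solution (A : List Int) : Int :=
  solLoopA A A.length 1 2000000000

-- ===== PORT B =====
-- total = sum(A); left = 0; answer = 2*10**9; for x in A[:-1]: left += x; answer = min(answer, abs(2*left - total))
def solution_alt (A : List Int) : Int :=
  let total := A.sum
  ((PySem.List.slice A none (some (-1))).foldl
    (fun (s : Int × Int) x => (s.1 + x, min s.2 |2 * (s.1 + x) - total|))
    (0, 2000000000)).2

-- ===== PRECONDITION & SPEC =====
def Spec_solution (A : List Int) (out : Int) : Prop := out = solution_alt A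
instance (A : List Int) (out : Int) : Decidable (Spec_solution A out) := by unfold Spec_solution; infer_instance

-- ===== CLAIM (what is proved, stated in full; the proofs are below) =====
def Claim_equal_solution : Prop := ∀ (A : List Int), Dom_solution A → Spec_solution A (solution A)

-- ===== LEMMAS AND PROOFS =====

theorem solLoopA_eq_foldl (A : List Int) (k : Nat) (ans : Int) :
    solLoopA A A.length (k + 1) ans =
      ((A.dropLast.drop k).foldl
        (fun (s : Int × Int) x => (s.1 + x, min s.2 |2 * (s.1 + x) - A.sum|))
        ((A.take k).sum, ans)).2 := by
  induction hn : A.length - (k + 1) generalizing k ans with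
  | zero =>
    have hk : A.length ≤ k + 1 := by omega
    rw [solLoopA]
    have hdrop : A.dropLast.drop k = [] := by
      apply List.drop_eq_nil_of_le
      simp [List.length_dropLast]; omega
    simp [hdrop, Nat.not_lt.mpr hk]
  | succ n ih =>
    have hk : k + 1 < A.length := by omega
    have hk' : k < A.length := by omega
    rw [solLoopA]
    simp only [hk, if_pos]
    have hcast : ((k + 1 : Nat) : Int) = ((k : Int) + 1) := by push_cast; ring
    rw [show ((k : Nat) + 1 + 1) = ((k + 1) + 1) from rfl,
        ih (k + 1) _ (by omega)]
    -- rewrite the slices on the LHS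
    rw [PySem.List.slice_to_natCast, PySem.List.slice_from_natCast]
    -- unfold one step of the foldl on the RHS
    have hkd : k < A.dropLast.length := by simp [List.length_dropLast]; omega
    have hdropcons : A.dropLast.drop k = A.dropLast[k] :: A.dropLast.drop (k + 1) :=
      List.drop_eq_getElem_cons hkd
    rw [hdropcons]
    simp only [List.foldl_cons]
    have hget : A.dropLast[k] = A[k] := List.getElem_dropLast hkd
    have htake : (A.take (k + 1)).sum = (A.take k).sum + A[k] := by
      rw [List.take_add_one, List.sum_append, List.getElem?_eq_getElem hk']
      simp
    have hsplit : (A.take (k + 1)).sum + (A.drop (k + 1)).sum = A.sum := by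
      rw [← List.sum_append, List.take_append_drop]
    rw [hget, ← htake]
    have habs : (A.take (k + 1)).sum - (A.drop (k + 1)).sum
        = 2 * (A.take (k + 1)).sum - A.sum := by omega
    rw [habs]

-- ===== VERDICT (by name: the statement is the Claim_ definition above) =====
theorem solution_spec : Claim_equal_solution := by
  intro A _
  unfold Spec_solution solution solution_alt
  rw [show (1 : Nat) = 0 + 1 from rfl, solLoopA_eq_foldl]
  simp [PySem.List.slice_to_neg_one]
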